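-- pv_equiv track=rewrite | github.com/naomiguen/game_nim | game/nim_logic.py | get_game_info
-- ===== SOURCE A (Python) =====
-- from typing import Iterable, List, Tuple, Dict
--
-- State = List[int]
--
-- def validate_state(state: State) -> None:
--     """Validasi state agar tidak korup."""
--     if not isinstance(state, list) or len(state) == 0:
--         raise ValueError("state harus berupa list non-kosong.")
--
--     for p in state:
--         if not isinstance(p, int):
--             raise TypeError("Setiap nilai pile harus int.")
--         if p < 0:
--             raise ValueError("Nilai pile tidak boleh negatif.")
--
-- def get_game_info(state: State) -> Dict[str, int]:
--     """
--     Mendapatkan informasi statistik dari state saat ini.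
--     """
--     validate_state(state)
--     return {
--         "total_sticks": sum(state),
--         "active_piles": sum(1 for p in state if p > 0),
--         "total_piles": len(state),
--         "empty_piles": sum(1 for p in state if p == 0),
--     }
-- ===== SOURCE B (Python) =====
-- from typing import List, Dict
--
-- State = List[int]
--
-- def validate_state(state: State) -> None:
--     if not isinstance(state, list) or len(state) == 0:
--         raise ValueError("state harus berupa list non-kosong.")
--     for p in state:
--         if not isinstance(p, int):
--             raise TypeError("Setiap nilai pile harus int.")
--         if p < 0:
--             raise ValueError("Nilai pile tidak boleh negatif.")
--
-- def get_game_info(state: State) -> Dict[str, int]: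
--     validate_state(state)
--     # Build a histogram (pile size -> multiplicity) once, then derive every
--     # statistic from it: empty_piles is a single dict lookup, active_piles is
--     # the arithmetic complement (piles are non-negative after validation), and
--     # total_sticks is the weighted sum over the distinct pile sizes.
--     hist: Dict[int, int] = {}
--     for p in state:
--         hist[p] = hist.get(p, 0) + 1
--     n = len(state)
--     empty = hist.get(0, 0)
--     total = 0
--     for size, mult in hist.items():
--         total += size * mult
--     return {
--         "total_sticks": total,
--         "active_piles": n - empty,
--         "total_piles": n,
--         "empty_piles": empty,
--     }
-- ===== Notes on version B (the rewrite author's own statement) =====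
-- stated objective: alternative
-- what changed: B builds a pile-size histogram (dict) in one pass and derives all statistics from it: empty_piles as a single hist lookup, active_piles as len(state)-empty (valid since validation rules out negatives), total_sticks as the weighted sum size*multiplicity over the distinct pile sizes; A instead scans the list separately with sum, two filtered counts and len. validate_state is kept unchanged so exceptions are identical.
import Mathlib
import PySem

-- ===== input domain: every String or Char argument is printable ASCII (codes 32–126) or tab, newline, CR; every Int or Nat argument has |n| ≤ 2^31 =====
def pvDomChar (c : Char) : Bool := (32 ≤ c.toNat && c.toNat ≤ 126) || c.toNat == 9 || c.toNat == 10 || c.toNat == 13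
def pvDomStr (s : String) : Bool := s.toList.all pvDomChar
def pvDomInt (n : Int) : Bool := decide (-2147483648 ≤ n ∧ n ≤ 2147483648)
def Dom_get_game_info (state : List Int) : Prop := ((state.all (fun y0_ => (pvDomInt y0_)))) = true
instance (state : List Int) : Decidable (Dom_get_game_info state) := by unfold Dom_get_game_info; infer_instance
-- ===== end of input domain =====

-- B derives the statistics from a pile-size histogram (dict built in one pass:
-- empty = one lookup, active = length - empty, total = weighted sum over distinct
-- sizes) instead of A's four separate scans (objective: alternative, same cost).


-- ===== PORT A =====
-- four separate passes, as in the Python dict literal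
def get_game_info (state : List Int) : List (String × Int) :=
  [ ("total_sticks", state.foldl (· + ·) 0),
    ("active_piles", ((state.filter (fun p => 0 < p)).length : Int)),
    ("total_piles", (state.length : Int)),
    ("empty_piles", ((state.filter (fun p => p == 0)).length : Int)) ]

-- ===== PORT B =====
-- histogram built once; empty = one lookup, active = n - empty,
-- total = weighted sum over the histogram's items
def get_game_info_alt (state : List Int) : List (String × Int) :=
  let hist := state.foldl (fun d p => d.insert p (d.getD p 0 + 1)) PySem.Dict.empty
  let n : Int := state.length
  let empty := hist.getD 0 0
  let total := hist.items.foldl (fun s kv => s + kv.1 * kv.2) 0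
  [ ("total_sticks", total),
    ("active_piles", n - empty),
    ("total_piles", n),
    ("empty_piles", empty) ]

-- ===== PRECONDITION & SPEC =====
-- A raises ValueError on an empty list or any negative pile; exactly those inputs are excluded.
def Pre_get_game_info (state : List Int) : Prop := state ≠ [] ∧ ∀ p ∈ state, 0 ≤ p
instance (state : List Int) : Decidable (Pre_get_game_info state) := by unfold Pre_get_game_info; infer_instance
def pvWitness_get_game_info : List Int := [3, 0, 2]

def Spec_get_game_info (state : List Int) (out : List (String × Int)) : Prop := out = get_game_info_alt state
instance (state : List Int) (out : List (String × Int)) : Decidable (Spec_get_game_info state out) := by unfold Spec_get_game_info; infer_instance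

-- ===== CLAIM (what is proved, stated in full; the proofs are below) =====
def Claim_equal_get_game_info : Prop := ∀ (state : List Int), Dom_get_game_info state → Pre_get_game_info state → Spec_get_game_info state (get_game_info state)

-- ===== LEMMAS AND PROOFS =====

-- A's sum(state) as List.sum
theorem gi_foldl_sum (xs : List Int) : xs.foldl (· + ·) 0 = xs.sum := by
  rw [List.sum_eq_foldl]

-- splitting a sum at one value k
theorem gi_sum_split (xs : List Int) (k : Int) :
    xs.sum = k * (xs.count k : Int) + (xs.filter (fun x => x ≠ k)).sum := by
  induction xs with
  | nil => simp
  | cons y ys ih =>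
    by_cases h : y = k
    · subst h
      simp only [List.sum_cons, List.count_cons_self, List.filter_cons]
      simp [ih]; ring
    · simp only [List.sum_cons, List.filter_cons]
      rw [List.count_cons_of_ne h]
      simp [h, ih]; ring

-- counts are unchanged by filtering away a different value
theorem gi_count_filter_ne (xs : List Int) (k k' : Int) (h : k' ≠ k) :
    (xs.filter (fun x => x ≠ k)).count k' = xs.count k' := by
  exact List.count_filter (by simp [h])

-- weighted sum over any Nodup key list covering xs equals xs.sum
theorem gi_key_sum (ks : List Int) : ∀ (xs : List Int), ks.Nodup →
    (∀ x ∈ xs, x ∈ ks) →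
    (ks.map (fun k => k * (xs.count k : Int))).sum = xs.sum := by
  induction ks with
  | nil =>
    intro xs _ hsub
    have : xs = [] := by
      cases xs with
      | nil => rfl
      | cons y ys => exact absurd (hsub y List.mem_cons_self) (by simp)
    simp [this]
  | cons k ks ih =>
    intro xs hnd hsub
    have hk : k ∉ ks := (List.nodup_cons.mp hnd).1
    have hnd' : ks.Nodup := (List.nodup_cons.mp hnd).2
    have hsub' : ∀ x ∈ xs.filter (fun x => x ≠ k), x ∈ ks := by
      intro x hx
      have hxm := List.mem_of_mem_filter hx
      have hxk : x ≠ k := by simpa using List.of_mem_filter hx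
      rcases List.mem_cons.mp (hsub x hxm) with he | he
      · exact absurd he hxk
      · exact he
    have hmap : ∀ k' ∈ ks,
        k' * ((xs.filter (fun x => x ≠ k)).count k' : Int) = k' * (xs.count k' : Int) := by
      intro k' hk'
      have : k' ≠ k := fun he => hk (he ▸ hk')
      rw [gi_count_filter_ne xs k k' this]
    calc ((k :: ks).map (fun k => k * (xs.count k : Int))).sum
        = k * (xs.count k : Int) + (ks.map (fun k' => k' * (xs.count k' : Int))).sum := by
          simp
      _ = k * (xs.count k : Int)
            + (ks.map (fun k' => k' * ((xs.filter (fun x => x ≠ k)).count k' : Int))).sum := by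
          rw [List.map_congr_left fun k' hk' => (hmap k' hk').symm]
      _ = k * (xs.count k : Int) + (xs.filter (fun x => x ≠ k)).sum := by
          rw [ih _ hnd' hsub']
      _ = xs.sum := (gi_sum_split xs k).symm

-- histogram items: weighted foldl sum equals xs.sum
theorem gi_hist_total (xs : List Int) :
    (PySem.Dict.counter xs).items.foldl (fun s kv => s + kv.1 * kv.2) 0 = xs.sum := by
  rw [PySem.Dict.items_counter]
  calc ((PySem.Set.ofList xs).map (fun k => (k, (xs.count k : Int)))).foldl
          (fun s kv => s + kv.1 * kv.2) 0
      = (PySem.Set.ofList xs).foldl (fun s k => s + k * (xs.count k : Int)) 0 := by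
        rw [List.foldl_map]
    _ = ((PySem.Set.ofList xs).map (fun k => k * (xs.count k : Int))).sum := by
        rw [List.sum_eq_foldl, List.foldl_map]
    _ = xs.sum := gi_key_sum (PySem.Set.ofList xs) xs
        (by simp)
        (by intro x hx; simpa using hx)

-- active piles: length minus zeros = positives when all are nonneg
theorem gi_active (xs : List Int) (h : ∀ p ∈ xs, 0 ≤ p) :
    (xs.length : Int) - (xs.count 0 : Int) = ((xs.filter (fun p => 0 < p)).length : Int) := by
  induction xs with
  | nil => simp
  | cons y ys ih =>
    have hy : 0 ≤ y := h y List.mem_cons_self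
    have hys := ih fun p hp => h p (List.mem_cons_of_mem _ hp)
    by_cases hy0 : y = 0
    · subst hy0
      rw [List.count_cons_self, List.filter_cons_of_neg (by simp)]
      simp only [List.length_cons]
      push_cast at hys ⊢
      omega
    · have hpos : 0 < y := lt_of_le_of_ne hy (Ne.symm hy0)
      rw [List.count_cons_of_ne hy0, List.filter_cons_of_pos (by simpa using hpos)]
      simp only [List.length_cons]
      push_cast at hys ⊢
      omega

-- count of zeros as a filter length (A's empty_piles pass)
theorem gi_empty (xs : List Int) :
    ((xs.filter (fun p => p == 0)).length : Int) = (xs.count 0 : Int) := by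
  congr 1
  rw [List.count_eq_countP, List.countP_eq_length_filter]

-- ===== VERDICT (by name: the statement is the Claim_ definition above) =====
theorem get_game_info_spec : Claim_equal_get_game_info := by
  intro state _ hpre
  show _ = _
  simp only [get_game_info, get_game_info_alt,
    PySem.Dict.foldl_insert_getD_add_one_eq_counter]
  rw [gi_hist_total, gi_foldl_sum, PySem.Dict.getD_counter, gi_empty,
    ← gi_active state hpre.2]
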